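-- pv_equiv track=rewrite | github.com/jmmichaud/BioinfoTools | DNASequencingFunctions.py | StartEndNodes
-- ===== SOURCE A (Python) =====
-- def StartEndNodes(inoutdict):
--     """Inputs a dictionary that enumerates the number of indegrees and outdegrees
--     for all nodes in a DeBruin Graph in the format: {node1 : [#indegree, #outdegree]...}.
--     Outputs the starting node for a semi-balanced path. A semi-balanced path is a path
--     where all nodes have the same number of indegrees as outdegrees except for 2
--     nodes that signify the begining and end of the path.  Start node has one less
--     indegree and the end node has one less outdegree.
--     Outputs two variables start node of a Eularian path as a string and a string
--     value that indicates whether the path is balanced. 'B' means fully balanced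
--     (circular), 'S' semi-balanced only two nodes that are unbalanced
--     """
--     startnodes = []
--     endnodes = []
--     balanced = 'U' # 'B' balanceD, 'S' semi-balanced, 'U' unbalanced
--     unbcount = 0
--     degreemax = 'N'
--     for key in inoutdict:
--         outminusmin = inoutdict[key][1] - inoutdict[key][0]
--         if outminusmin == 1:
--             startnodes.append(key)
--             unbcount += 1
--         elif outminusmin == -1:
--             unbcount += 1
--             endnodes.append(key)
--         elif abs(outminusmin) >1:
--             unbcount += abs(outminusmin)
--             degreemax = 'Y'
--     if unbcount == 0:
--         balanced = 'B'
--     elif unbcount <= 2: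
--         balanced = 'S'
--     elif degreemax == 'Y':
--         balanced = 'U'
--     return startnodes, endnodes, balanced
-- ===== SOURCE B (Python) =====
-- def StartEndNodes(inoutdict):
--     # group node keys by their out-in degree difference; the per-node
--     # classification branch disappears into this index
--     groups = {}
--     for key, deg in inoutdict.items():
--         groups.setdefault(deg[1] - deg[0], []).append(key)
--     total = sum(abs(deg[1] - deg[0]) for deg in inoutdict.values())
--     balanced = 'B' if total == 0 else 'S' if total <= 2 else 'U'
--     return groups.get(1, []), groups.get(-1, []), balanced
-- ===== Notes on version B (the rewrite author's own statement) =====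
-- stated objective: alternative
-- what changed: Replaces A's stateful classification loop (branching per node to append into two lists, count imbalance and set a dead degreemax flag, then a 4-way trailing branch) by building a group-by dictionary keyed on the out-in difference and reading the start/end lists off keys 1 and -1, with the balance letter derived in closed form from the total absolute imbalance.
-- outside the precondition, e.g. on StartEndNodes({'a': [1]}): A raises IndexError, B raises IndexError
import Mathlib
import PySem

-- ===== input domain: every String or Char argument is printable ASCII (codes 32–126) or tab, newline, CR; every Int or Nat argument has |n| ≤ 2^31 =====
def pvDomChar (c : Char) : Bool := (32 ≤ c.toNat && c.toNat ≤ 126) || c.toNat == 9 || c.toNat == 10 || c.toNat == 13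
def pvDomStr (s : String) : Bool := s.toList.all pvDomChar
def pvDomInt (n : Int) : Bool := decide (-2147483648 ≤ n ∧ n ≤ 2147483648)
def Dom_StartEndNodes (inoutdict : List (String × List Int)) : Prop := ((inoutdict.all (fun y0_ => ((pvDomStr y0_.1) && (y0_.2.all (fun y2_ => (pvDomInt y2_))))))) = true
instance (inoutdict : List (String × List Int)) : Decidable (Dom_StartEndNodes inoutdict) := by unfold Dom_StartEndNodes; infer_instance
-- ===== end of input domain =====

-- B replaces A's stateful classification loop (two appended lists, imbalance counter, dead degreemax
-- flag, trailing 4-way branch) by a group-by dictionary keyed on the out-in difference: the start/end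
-- lists are read off keys 1 and -1 and the balance letter is derived in closed form (alternative).

-- ===== PORT A =====
-- loop body: one step of 'for key in inoutdict' (dict iteration visits each key/value pair);
-- state = (startnodes, endnodes, unbcount, degreemax); v[1]/v[0] via pyGetD, in range under Pre_
def pvStepA (st : List String × List String × Int × String) (p : String × List Int) :
    List String × List String × Int × String :=
  let om := PySem.List.pyGetD p.2 1 0 - PySem.List.pyGetD p.2 0 0
  if om = 1 then (st.1 ++ [p.1], st.2.1, st.2.2.1 + 1, st.2.2.2)
  else if om = -1 then (st.1, st.2.1 ++ [p.1], st.2.2.1 + 1, st.2.2.2)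
  else if 1 < om.natAbs then (st.1, st.2.1, st.2.2.1 + (om.natAbs : Int), "Y")
  else st

def StartEndNodes (inoutdict : List (String × List Int)) : List String × List String × String :=
  let st := inoutdict.foldl pvStepA ([], [], 0, "N")
  let balanced :=
    if st.2.2.1 = 0 then "B"
    else if st.2.2.1 ≤ 2 then "S"
    else if st.2.2.2 = "Y" then "U"
    else "U"   -- initial value of 'balanced' kept when no branch fires
  (st.1, st.2.1, balanced)

-- ===== PORT B =====
-- deg[1] - deg[0], written once as Source B writes it inline
def pvDiff (p : String × List Int) : Int := PySem.List.pyGetD p.2 1 0 - PySem.List.pyGetD p.2 0 0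

def StartEndNodes_alt (inoutdict : List (String × List Int)) : List String × List String × String :=
  -- groups.setdefault(deg[1]-deg[0], []).append(key)  =  d[k] = d.get(k, []) ++ [key]  =  Dict.modify
  let groups := inoutdict.foldl (fun g p => g.modify (pvDiff p) [] (· ++ [p.1])) PySem.Dict.empty
  let total := (inoutdict.map (fun p => ((pvDiff p).natAbs : Int))).sum
  let balanced := if total = 0 then "B" else if total ≤ 2 then "S" else "U"
  (groups.getD 1 [], groups.getD (-1) [], balanced)

-- ===== PRECONDITION & SPEC =====
-- Pre_ excludes value lists of length < 2, on which Python A raises IndexError, and lists with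
-- duplicate keys, which cannot arise from A's dict input (the assoc-list encoding admits them).
def Pre_StartEndNodes (inoutdict : List (String × List Int)) : Prop :=
  (inoutdict.map Prod.fst).Nodup ∧ ∀ p ∈ inoutdict, 2 ≤ p.2.length
instance (inoutdict : List (String × List Int)) : Decidable (Pre_StartEndNodes inoutdict) := by
  unfold Pre_StartEndNodes; infer_instance
def pvWitness_StartEndNodes : (List (String × List Int)) := [("AG", [0, 1]), ("GC", [1, 0])]

def Spec_StartEndNodes (inoutdict : List (String × List Int)) (out : List String × List String × String) : Prop := out = StartEndNodes_alt inoutdict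
instance (inoutdict : List (String × List Int)) (out : List String × List String × String) : Decidable (Spec_StartEndNodes inoutdict out) := by unfold Spec_StartEndNodes; infer_instance

-- ===== CLAIM (what is proved, stated in full; the proofs are below) =====
def Claim_equal_StartEndNodes : Prop := ∀ (inoutdict : List (String × List Int)), Dom_StartEndNodes inoutdict → Pre_StartEndNodes inoutdict → Spec_StartEndNodes inoutdict (StartEndNodes inoutdict)

-- ===== LEMMAS AND PROOFS =====

-- Loop invariant: A's fold appends the keys with difference 1 / -1 and adds the absolute differences.
theorem pvStepA_inv (l : List (String × List Int)) :
    ∀ (sn en : List String) (u : Int) (dm : String),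
      (l.foldl pvStepA (sn, en, u, dm)).1
        = sn ++ (l.filter (fun p => pvDiff p = 1)).map Prod.fst
      ∧ (l.foldl pvStepA (sn, en, u, dm)).2.1
        = en ++ (l.filter (fun p => pvDiff p = -1)).map Prod.fst
      ∧ (l.foldl pvStepA (sn, en, u, dm)).2.2.1
        = u + (l.map (fun p => ((pvDiff p).natAbs : Int))).sum := by
  induction l with
  | nil => intro sn en u dm; simp
  | cons p t ih =>
    intro sn en u dm
    simp only [List.foldl_cons, List.filter_cons, List.map_cons, List.sum_cons]
    by_cases h1 : pvDiff p = 1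
    · have hstep : pvStepA (sn, en, u, dm) p = (sn ++ [p.1], en, u + 1, dm) := by
        simp [pvStepA, pvDiff] at h1 ⊢; simp [h1]
      rw [hstep]
      obtain ⟨a, b, c⟩ := ih (sn ++ [p.1]) en (u + 1) dm
      refine ⟨?_, ?_, ?_⟩ <;> simp [a, b, c, h1] <;> ring
    · by_cases h2 : pvDiff p = -1
      · have hstep : pvStepA (sn, en, u, dm) p = (sn, en ++ [p.1], u + 1, dm) := by
          simp [pvStepA, pvDiff] at h1 h2 ⊢; simp [h2]
        rw [hstep]
        obtain ⟨a, b, c⟩ := ih sn (en ++ [p.1]) (u + 1) dm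
        refine ⟨?_, ?_, ?_⟩ <;> simp [a, b, c, h2] <;> ring
      · by_cases h3 : 1 < (pvDiff p).natAbs
        · have hstep : pvStepA (sn, en, u, dm) p
              = (sn, en, u + (((pvDiff p).natAbs : Nat) : Int), "Y") := by
            simp [pvStepA, pvDiff] at h1 h2 h3 ⊢; simp [h1, h2, h3]
          rw [hstep]
          obtain ⟨a, b, c⟩ := ih sn en (u + (((pvDiff p).natAbs : Nat) : Int)) "Y"
          simp only [Int.natCast_natAbs] at a b c
          refine ⟨?_, ?_, ?_⟩ <;> simp [a, b, c, h1, h2] <;> ring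
        · have hz : pvDiff p = 0 := by unfold pvDiff at *; omega
          have hstep : pvStepA (sn, en, u, dm) p = (sn, en, u, dm) := by
            simp [pvStepA, pvDiff] at h1 h2 h3 ⊢; simp [h1, h2, h3]
          rw [hstep]
          obtain ⟨a, b, c⟩ := ih sn en u dm
          refine ⟨?_, ?_, ?_⟩ <;> simp [a, b, c, hz]

-- B's group-by dict, looked up at any difference c, yields exactly the keys whose difference is c.
theorem pvGroups_getD (l : List (String × List Int)) (c : Int) :
    (l.foldl (fun g p => g.modify (pvDiff p) [] (· ++ [p.1])) PySem.Dict.empty).getD c []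
      = (l.filter (fun p => pvDiff p = c)).map Prod.fst := by
  have hfold :
      l.foldl (fun g p => g.modify (pvDiff p) [] (· ++ [p.1])) PySem.Dict.empty
        = (l.map (fun p => (pvDiff p, p.1))).foldl
            (fun d q => d.modify q.1 [] (· ++ [q.2])) PySem.Dict.empty := by
    rw [List.foldl_map]
  rw [hfold, PySem.Dict.getD_foldl_modify_append]
  have hf : l.filter (fun x => pvDiff x == c) = l.filter (fun p => decide (pvDiff p = c)) :=
    List.filter_congr (fun x _ => by by_cases h : pvDiff x = c <;> simp [h])
  simp [PySem.Dict.empty, PySem.Dict.getD, PySem.Dict.get?, List.filter_map, Function.comp_def, hf]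

-- ===== VERDICT (by name: the statement is the Claim_ definition above) =====
theorem StartEndNodes_spec : Claim_equal_StartEndNodes := by
  intro l _ _
  unfold Spec_StartEndNodes StartEndNodes StartEndNodes_alt
  dsimp only
  obtain ⟨a, b, c⟩ := pvStepA_inv l [] [] 0 "N"
  rw [a, b, c, pvGroups_getD, pvGroups_getD]
  simp only [List.nil_append, zero_add]
  split_ifs <;> rfl
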